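-- pv_equiv track=rewrite | github.com/alevar/genomic_scripts | definitions.py | extract_from_comp
-- ===== SOURCE A (Python) =====
-- def extract_from_comp(segs:list) -> (list,list,list): # separated "shared,left,right" into separate objects
--     """
--     This function extracts segments from a comparison of two chains of intervals. Instead of having all segments in one list, this function returns three lists: shared, left, and right.
--
--     Parameters:
--     segs (list): A list of intervals representing the comparison of two chains of intervals.
--             Each interval in the result contains of three values: the start position,
--             the end position, and the code. The code is -1 if the interval is in the first chain only,
--             1 if the interval is in the second chain only, and 0 if the interval is in both chains.
--
--     Returns:
--     list: A list of intervals that are in the first chain only.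
--     list: A list of intervals that are in both chains.
--     list: A list of intervals that are in the second chain only.
--     """
--     left=[]
--     shared=[]
--     right=[]
--     for s in segs:
--         if s[2]==-1:
--             left.append(s[:2])
--         if s[2]==1:
--             right.append(s[:2])
--         if s[2]==0:
--             shared.append(s[:2])
--
--     return left,shared,right
-- ===== SOURCE B (Python) =====
-- def extract_from_comp(segs: list) -> (list, list, list):
--     # Divide and conquer: partition each half recursively, then concatenate the
--     # three partitions componentwise. Order is preserved because concatenation of
--     # the halves' partitions equals the partition of the concatenation.
--     n = len(segs)
--     if n == 0:
--         return [], [], []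
--     if n == 1:
--         s = segs[0]
--         code = s[2]
--         if code == -1:
--             return [s[:2]], [], []
--         elif code == 0:
--             return [], [s[:2]], []
--         elif code == 1:
--             return [], [], [s[:2]]
--         else:
--             return [], [], []
--     mid = n // 2
--     l1, sh1, r1 = extract_from_comp(segs[:mid])
--     l2, sh2, r2 = extract_from_comp(segs[mid:])
--     return l1 + l2, sh1 + sh2, r1 + r2
-- ===== Notes on version B (the rewrite author's own statement) =====
-- stated objective: alternative
-- what changed: Replaced A's single forward accumulator loop with a divide-and-conquer recursion: split the list in half, partition each half recursively, and concatenate the three resulting partitions componentwise.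
import Mathlib
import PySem

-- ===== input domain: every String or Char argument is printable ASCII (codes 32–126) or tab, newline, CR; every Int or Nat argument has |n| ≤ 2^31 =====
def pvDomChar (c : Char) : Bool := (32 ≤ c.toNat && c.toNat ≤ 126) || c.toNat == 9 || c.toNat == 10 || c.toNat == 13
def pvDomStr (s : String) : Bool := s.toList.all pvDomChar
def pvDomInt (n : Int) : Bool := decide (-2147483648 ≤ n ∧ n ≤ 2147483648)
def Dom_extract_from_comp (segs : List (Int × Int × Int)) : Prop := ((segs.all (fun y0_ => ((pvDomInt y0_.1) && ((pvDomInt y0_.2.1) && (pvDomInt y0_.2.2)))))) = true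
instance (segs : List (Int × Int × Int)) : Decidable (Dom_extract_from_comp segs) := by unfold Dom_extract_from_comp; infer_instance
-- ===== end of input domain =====

-- B replaces A's single forward accumulator loop with a divide-and-conquer recursion that partitions each half and concatenates the partitions componentwise (objective: alternative).


-- ===== PORT A =====
-- A's loop body: the three independent if-branches of the Python loop, in order
def extract_step (acc : List (Int × Int) × List (Int × Int) × List (Int × Int))
    (s : Int × Int × Int) : List (Int × Int) × List (Int × Int) × List (Int × Int) :=
  let left := if s.2.2 == -1 then acc.1 ++ [(s.1, s.2.1)] else acc.1
  let right := if s.2.2 == 1 then acc.2.1 ++ [(s.1, s.2.1)] else acc.2.1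
  let shared := if s.2.2 == 0 then acc.2.2 ++ [(s.1, s.2.1)] else acc.2.2
  (left, right, shared)

def extract_from_comp (segs : List (Int × Int × Int)) : (List (Int × Int)) × (List (Int × Int)) × (List (Int × Int)) :=
  let r := segs.foldl extract_step ([], [], [])
  (r.1, r.2.2, r.2.1)

-- ===== PORT B =====
-- divide and conquer over the list; segs[:mid] / segs[mid:] with 0 ≤ mid ≤ len are exactly take/drop
def extract_from_comp_alt (segs : List (Int × Int × Int)) : (List (Int × Int)) × (List (Int × Int)) × (List (Int × Int)) :=
  match segs with
  | [] => ([], [], [])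
  | [s] =>
      if s.2.2 == -1 then ([(s.1, s.2.1)], [], [])
      else if s.2.2 == 0 then ([], [(s.1, s.2.1)], [])
      else if s.2.2 == 1 then ([], [], [(s.1, s.2.1)])
      else ([], [], [])
  | a :: b :: rest =>
      let segs' := a :: b :: rest
      let mid := segs'.length / 2
      let p1 := extract_from_comp_alt (segs'.take mid)
      let p2 := extract_from_comp_alt (segs'.drop mid)
      (p1.1 ++ p2.1, p1.2.1 ++ p2.2.1, p1.2.2 ++ p2.2.2)
termination_by segs.length
decreasing_by
  · simp [List.length_take]; omega
  · simp [List.length_drop]; omega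

-- ===== PRECONDITION & SPEC =====
def Spec_extract_from_comp (segs : List (Int × Int × Int)) (out : (List (Int × Int)) × (List (Int × Int)) × (List (Int × Int))) : Prop := out = extract_from_comp_alt segs
instance (segs : List (Int × Int × Int)) (out : (List (Int × Int)) × (List (Int × Int)) × (List (Int × Int))) : Decidable (Spec_extract_from_comp segs out) := by unfold Spec_extract_from_comp; infer_instance

-- ===== CLAIM =====
def Claim_equal_extract_from_comp : Prop := ∀ (segs : List (Int × Int × Int)), Dom_extract_from_comp segs → Spec_extract_from_comp segs (extract_from_comp segs)

-- ===== LEMMAS AND PROOFS =====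
-- the common characterisation: the triple of filtered/mapped lists
def extract_filters (segs : List (Int × Int × Int)) : (List (Int × Int)) × (List (Int × Int)) × (List (Int × Int)) :=
  ((segs.filter (fun s => s.2.2 == -1)).map (fun s => (s.1, s.2.1)),
   (segs.filter (fun s => s.2.2 == 0)).map (fun s => (s.1, s.2.1)),
   (segs.filter (fun s => s.2.2 == 1)).map (fun s => (s.1, s.2.1)))

-- A's loop invariant: the fold from any accumulator appends the three filtered/mapped lists
theorem extract_fold_inv (segs : List (Int × Int × Int))
    (l r sh : List (Int × Int)) :
    segs.foldl extract_step (l, r, sh)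
    = (l ++ (segs.filter (fun s => s.2.2 == -1)).map (fun s => (s.1, s.2.1)),
       r ++ (segs.filter (fun s => s.2.2 == 1)).map (fun s => (s.1, s.2.1)),
       sh ++ (segs.filter (fun s => s.2.2 == 0)).map (fun s => (s.1, s.2.1))) := by
  induction segs generalizing l r sh with
  | nil => simp
  | cons h t ih =>
    simp only [List.foldl_cons, List.filter_cons]
    rw [extract_step, ih]
    by_cases h1 : h.2.2 = -1 <;> by_cases h2 : h.2.2 = 1 <;> by_cases h0 : h.2.2 = 0 <;>
      simp_all

-- B equals the filter characterisation, by strong induction on the length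
theorem alt_eq_filters (segs : List (Int × Int × Int)) :
    extract_from_comp_alt segs = extract_filters segs := by
  induction segs using extract_from_comp_alt.induct with
  | case1 => simp [extract_from_comp_alt, extract_filters]
  | case2 s h => simp_all [extract_from_comp_alt, extract_filters]
  | case3 s h1 h0 => simp_all [extract_from_comp_alt, extract_filters]
  | case4 s h1 h0 h2 => simp_all [extract_from_comp_alt, extract_filters]
  | case5 s h1 h0 h2 => simp_all [extract_from_comp_alt, extract_filters]
  | case6 a b rest segs' mid ih1 ih2 =>
      have h1 : extract_from_comp_alt (List.take ((a :: b :: rest).length / 2) (a :: b :: rest))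
          = extract_filters (List.take ((a :: b :: rest).length / 2) (a :: b :: rest)) := ih1
      have h2 : extract_from_comp_alt (List.drop ((a :: b :: rest).length / 2) (a :: b :: rest))
          = extract_filters (List.drop ((a :: b :: rest).length / 2) (a :: b :: rest)) := ih2
      rw [extract_from_comp_alt]
      simp only [h1, h2, extract_filters, Prod.mk.injEq]
      refine ⟨?_, ?_, ?_⟩ <;>
        rw [← List.map_append, ← List.filter_append, List.take_append_drop]

-- ===== VERDICT =====
theorem extract_from_comp_spec : Claim_equal_extract_from_comp := by
  intro segs _
  unfold Spec_extract_from_comp extract_from_comp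
  rw [extract_fold_inv, alt_eq_filters]
  simp [extract_filters]
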